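-- pv_equiv track=rewrite | github.com/AndreaVisma/csh_remittances | generalised_pipeline/simulations/diaspora_profiles.py | zero_after_second_zero
-- ===== SOURCE A (Python) =====
-- def zero_after_second_zero(lst):
--     zero_count = 0
--     for i in range(len(lst)):
--         if lst[i] == 0:
--             zero_count += 1
--             if zero_count == 2:
--                 # Set all remaining elements to 0
--                 lst[i+1:] = [0] * (len(lst) - i - 1)
--                 break
--     return lst
-- ===== SOURCE B (Python) =====
-- def zero_after_second_zero(lst):
--     seen = 0
--     out = []
--     for x in lst:
--         out.append(0 if seen >= 2 else x)
--         if x == 0: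
--             seen += 1
--     lst[:] = out
--     return lst
-- ===== Notes on version B (the rewrite author's own statement) =====
-- stated objective: alternative
-- what changed: Replaces A's locate-the-second-zero scan with break and tail slice-assignment by a single full-pass rebuild: every element is mapped to 0 exactly when at least two zeros occur strictly before it (running prefix count), then written back with lst[:] = out.
import Mathlib
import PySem

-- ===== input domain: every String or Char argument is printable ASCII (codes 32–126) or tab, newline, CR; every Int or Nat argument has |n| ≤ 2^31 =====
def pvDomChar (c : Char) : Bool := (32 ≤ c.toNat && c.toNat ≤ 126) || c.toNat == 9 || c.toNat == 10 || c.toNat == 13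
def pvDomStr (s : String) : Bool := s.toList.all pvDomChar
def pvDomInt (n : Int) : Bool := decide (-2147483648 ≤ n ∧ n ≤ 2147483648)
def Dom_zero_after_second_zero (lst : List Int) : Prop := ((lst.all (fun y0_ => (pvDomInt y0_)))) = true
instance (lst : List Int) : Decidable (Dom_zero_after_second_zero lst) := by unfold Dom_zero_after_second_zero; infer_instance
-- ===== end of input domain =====

-- B rebuilds the whole list in one pass, zeroing each element once two zeros occur strictly
-- before it (running prefix count), instead of A's locate-second-zero-then-slice with break
-- (alternative decomposition; both mutate lst in place in Python; return value proved equal).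

-- ===== PORT A =====
-- A scans left to right counting zeros; on the second zero it overwrites the rest with 0 and breaks.
def zeroCountLoop : List Int → Int → List Int
  | [], _ => []
  | x :: xs, c =>
    if x = 0 then
      if c + 1 = 2 then x :: xs.map (fun _ => 0)   -- lst[i+1:] = [0]*(len-i-1); break
      else x :: zeroCountLoop xs (c + 1)
    else x :: zeroCountLoop xs c

def zero_after_second_zero (lst : List Int) : List Int := zeroCountLoop lst 0

-- ===== PORT B =====
-- out.append(0 if seen >= 2 else x); if x == 0: seen += 1 — over all of lst, then lst[:] = out.
def prefixZeroMap : List Int → Int → List Int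
  | [], _ => []
  | x :: xs, seen =>
    (if seen ≥ 2 then 0 else x) :: prefixZeroMap xs (if x = 0 then seen + 1 else seen)

def zero_after_second_zero_alt (lst : List Int) : List Int := prefixZeroMap lst 0

-- ===== PRECONDITION & SPEC =====
def Spec_zero_after_second_zero (lst : List Int) (out : List Int) : Prop := out = zero_after_second_zero_alt lst
instance (lst : List Int) (out : List Int) : Decidable (Spec_zero_after_second_zero lst out) := by unfold Spec_zero_after_second_zero; infer_instance

-- ===== CLAIM =====
def Claim_equal_zero_after_second_zero : Prop := ∀ (lst : List Int), Dom_zero_after_second_zero lst → Spec_zero_after_second_zero lst (zero_after_second_zero lst)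

-- ===== LEMMAS AND PROOFS =====

-- Once two zeros have been seen, B maps everything to 0.
theorem prefixZeroMap_sat (xs : List Int) (c : Int) (h : c ≥ 2) :
    prefixZeroMap xs c = xs.map (fun _ => 0) := by
  induction xs generalizing c with
  | nil => rfl
  | cons x xs ih =>
    have h' : (if x = 0 then c + 1 else c) ≥ 2 := by split <;> omega
    simp [prefixZeroMap, h, ih _ h']

-- With one zero already seen, the two loops agree.
theorem loop_one (xs : List Int) : zeroCountLoop xs 1 = prefixZeroMap xs 1 := by
  induction xs with
  | nil => rfl
  | cons x xs ih =>
    by_cases hx : x = 0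
    · subst hx
      simp [zeroCountLoop, prefixZeroMap, prefixZeroMap_sat xs 2 (by omega)]
    · simp [zeroCountLoop, prefixZeroMap, hx, ih]

theorem loop_zero (xs : List Int) : zeroCountLoop xs 0 = prefixZeroMap xs 0 := by
  induction xs with
  | nil => rfl
  | cons x xs ih =>
    by_cases hx : x = 0
    · subst hx
      norm_num [zeroCountLoop, prefixZeroMap, loop_one]
    · simp [zeroCountLoop, prefixZeroMap, hx, ih]

-- ===== VERDICT =====
theorem zero_after_second_zero_spec : Claim_equal_zero_after_second_zero := by
  intro lst _
  unfold Spec_zero_after_second_zero zero_after_second_zero zero_after_second_zero_alt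
  exact loop_zero lst
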